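-- pv_equiv track=rewrite | github.com/rahmay1/dynamic-resume-highlighter | highlight_resume_dynamic.py | protected_ranges
-- ===== SOURCE A (Python) =====
-- def find_brace_span(s: str, start: int):
--     if start >= len(s) or s[start] != '{':
--         return None
--     i, depth = start, 0
--     while i < len(s):
--         if s[i] == '{': depth += 1
--         elif s[i] == '}':
--             depth -= 1
--             if depth == 0: return i
--         i += 1
--     return None
--
-- def protected_ranges(tex: str):
--     ranges, i = [], 0
--     while i < len(tex):
--         if tex.startswith('\\textbf{', i):
--             brace = tex.find('{', i)
--             if brace != -1:
--                 end = find_brace_span(tex, brace)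
--                 if end is not None:
--                     ranges.append((i, end+1)); i = end + 1; continue
--         elif tex.startswith('\\url{', i) or tex.startswith('\\href{', i):
--             brace = tex.find('{', i)
--             if brace != -1:
--                 end = find_brace_span(tex, brace)
--                 if end is not None:
--                     if tex.startswith('\\href{', i):
--                         second = tex.find('{', end+1)
--                         if second != -1:
--                             end2 = find_brace_span(tex, second)
--                             if end2 is not None:
--                                 ranges.append((i, end2+1)); i = end2 + 1; continue
--                     else:
--                         ranges.append((i, end+1)); i = end + 1; continue
--         i += 1
--     return ranges
-- ===== SOURCE B (Python) =====
-- def protected_ranges(tex: str):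
--     n = len(tex)
--     # pass 1: pair every '{' with its matching '}' using a stack
--     match = {}
--     stack = []
--     for j, c in enumerate(tex):
--         if c == '{':
--             stack.append(j)
--         elif c == '}' and stack:
--             match[stack.pop()] = j
--     # pass 2: next_open[p] = smallest index >= p holding '{' (n if none)
--     next_open = [n] * (n + 1)
--     for j in range(n - 1, -1, -1):
--         next_open[j] = j if tex[j] == '{' else next_open[j + 1]
--     # pass 3: scan for commands, consuming pre-matched groups in O(1) each
--     ranges, i = [], 0
--     while i < n:
--         hit = 0
--         for p, g in (('\\textbf{', 1), ('\\url{', 1), ('\\href{', 2)):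
--             if tex.startswith(p, i):
--                 hit = g
--                 break
--         if hit:
--             pos, ok = i, True
--             for _ in range(hit):
--                 b = next_open[pos]
--                 if b == n or b not in match:
--                     ok = False
--                     break
--                 pos = match[b] + 1
--             if ok:
--                 ranges.append((i, pos))
--                 i = pos
--                 continue
--         i += 1
--     return ranges
-- ===== Notes on version B (the rewrite author's own statement) =====
-- stated objective: alternative
-- what changed: B first pairs every brace with a one-pass stack matcher and builds a next-open-brace table, then the command scan consumes each protected group by pure table lookups, replacing A's per-command find() calls and nested depth-counting rescans (incl. the special-cased \href second group).
import Mathlib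
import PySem

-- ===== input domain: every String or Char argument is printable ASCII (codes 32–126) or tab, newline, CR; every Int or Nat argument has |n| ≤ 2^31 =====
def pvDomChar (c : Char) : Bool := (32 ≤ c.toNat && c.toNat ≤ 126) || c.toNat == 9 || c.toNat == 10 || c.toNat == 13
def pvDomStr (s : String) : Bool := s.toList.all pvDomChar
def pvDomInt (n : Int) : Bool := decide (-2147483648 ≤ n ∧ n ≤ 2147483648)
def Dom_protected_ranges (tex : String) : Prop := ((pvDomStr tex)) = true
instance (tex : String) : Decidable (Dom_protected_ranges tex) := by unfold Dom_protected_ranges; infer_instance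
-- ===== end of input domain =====

-- B replaces A's per-command inner scans (find('{') plus a depth-counting rescan, with a
-- special-cased nested \href second group) by a staged computation: one stack pass pairing
-- every brace, one backward pass tabulating the next '{', then a scan that consumes each
-- protected group by table lookups (objective: alternative); equality of the return values
-- is proved below.

-- ===== PORT A =====

-- while-loop of find_brace_span: i runs from start with a depth counter, early return at the
-- matching close; fuel (= number of remaining iterations, s.length - i at every call) only
-- makes the recursion structural, the `i < s.length` guard is Python's loop condition
def findSpanLoop (s : List Char) : Nat → Nat → Int → Option Nat
  | 0, _, _ => none
  | fuel + 1, i, depth =>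
    if h : i < s.length then
      if s[i] = '{' then findSpanLoop s fuel (i + 1) (depth + 1)
      else if s[i] = '}' then
        if depth - 1 = 0 then some i else findSpanLoop s fuel (i + 1) (depth - 1)
      else findSpanLoop s fuel (i + 1) depth
    else none

-- find_brace_span(s, start)
def find_brace_span (s : List Char) (start : Nat) : Option Nat :=
  if h : start < s.length then
    if s[start] = '{' then findSpanLoop s (s.length - start) start 0 else none
  else none

-- main while-loop of A, transliterated branch for branch; fuel = s.length - i bounds the
-- remaining iterations (i grows by at least 1 per step), the `i < s.length` guard is Python's
-- (tex.startswith(p, i) with 0 ≤ i ≤ len is the prefix test on the drop at i)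
def aLoop (s : List Char) : Nat → Nat → List (Int × Int) → List (Int × Int)
  | 0, _, acc => acc
  | fuel + 1, i, acc =>
    if _hi : i < s.length then
      if PySem.Chars.startswith (s.drop i) "\\textbf{".toList then
        if _hb : PySem.Chars.findFrom s ['{'] (i : Int) none ≠ -1 then
          match find_brace_span s (PySem.Chars.findFrom s ['{'] (i : Int) none).toNat with
          | some e => aLoop s fuel (e + 1) (acc ++ [((i : Int), (e : Int) + 1)])
          | none => aLoop s fuel (i + 1) acc
        else aLoop s fuel (i + 1) acc
      else if PySem.Chars.startswith (s.drop i) "\\url{".toList ||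
              PySem.Chars.startswith (s.drop i) "\\href{".toList then
        if _hb : PySem.Chars.findFrom s ['{'] (i : Int) none ≠ -1 then
          match find_brace_span s (PySem.Chars.findFrom s ['{'] (i : Int) none).toNat with
          | some e =>
            if PySem.Chars.startswith (s.drop i) "\\href{".toList then
              if _hs : PySem.Chars.findFrom s ['{'] ((e + 1 : Nat) : Int) none ≠ -1 then
                match find_brace_span s (PySem.Chars.findFrom s ['{'] ((e + 1 : Nat) : Int) none).toNat with
                | some e2 => aLoop s fuel (e2 + 1) (acc ++ [((i : Int), (e2 : Int) + 1)])
                | none => aLoop s fuel (i + 1) acc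
              else aLoop s fuel (i + 1) acc
            else aLoop s fuel (e + 1) (acc ++ [((i : Int), (e : Int) + 1)])
          | none => aLoop s fuel (i + 1) acc
        else aLoop s fuel (i + 1) acc
      else aLoop s fuel (i + 1) acc
    else acc

def protected_ranges (tex : String) : List (Int × Int) :=
  aLoop tex.toList tex.toList.length 0 []

-- ===== PORT B =====

-- pass 1 of B: `for j, c in enumerate(tex)` pairing each '{' with its '}' via a stack
-- (list head = top of Python's list-as-stack end); j is enumerate's counter
def buildMatch : List Char → Nat → List Nat → PySem.Dict Nat Nat → PySem.Dict Nat Nat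
  | [], _, _, m => m
  | c :: rest, j, stack, m =>
    if c = '{' then buildMatch rest (j + 1) (j :: stack) m
    else if c = '}' then
      match stack with
      | [] => buildMatch rest (j + 1) [] m
      | b :: st => buildMatch rest (j + 1) st (m.insert b j)
    else buildMatch rest (j + 1) stack m

-- pass 2 of B: the next_open array, built right to left exactly as Python's backward loop
-- (next_open[j] = j if tex[j]=='{' else next_open[j+1], seeded with n at index n)
def buildNO : List Char → Nat → Nat → List Nat
  | [], _, n => [n]
  | c :: rest, j, n =>
    let t := buildNO rest (j + 1) n
    (if c = '{' then j else t.headD n) :: t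

-- B's inner for-loop: consume g pre-matched brace groups starting the search at pos;
-- some r = final pos (one past the last closing brace), none = some group failed
def consumeB (m : PySem.Dict Nat Nat) (no : List Nat) (n : Nat) : Nat → Nat → Option Nat
  | pos, 0 => some pos
  | pos, g + 1 =>
    let b := no.getD pos n
    if b = n then none
    else
      match m.get? b with
      | none => none
      | some e => consumeB m no n (e + 1) g

-- the command tuple B's inner prefix for-loop (with break) iterates over
def bTable : List (List Char × Nat) :=
  [("\\textbf{".toList, 1), ("\\url{".toList, 1), ("\\href{".toList, 2)]

-- pass 3 of B: the main while-loop; fuel = s.length - i bounds the remaining iterations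
def bLoop (s : List Char) (m : PySem.Dict Nat Nat) (no : List Nat) :
    Nat → Nat → List (Int × Int) → List (Int × Int)
  | 0, _, acc => acc
  | fuel + 1, i, acc =>
    if _hi : i < s.length then
      if _hg : 0 < ((bTable.find? (fun pg => PySem.Chars.startswith (s.drop i) pg.1)).map Prod.snd).getD 0 then
        match consumeB m no s.length i (((bTable.find? (fun pg => PySem.Chars.startswith (s.drop i) pg.1)).map Prod.snd).getD 0) with
        | some pos => bLoop s m no fuel pos (acc ++ [((i : Int), (pos : Int))])
        | none => bLoop s m no fuel (i + 1) acc
      else bLoop s m no fuel (i + 1) acc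
    else acc

def protected_ranges_alt (tex : String) : List (Int × Int) :=
  bLoop tex.toList (buildMatch tex.toList 0 [] PySem.Dict.empty)
    (buildNO tex.toList 0 tex.toList.length) tex.toList.length 0 []

-- ===== PRECONDITION & SPEC =====
def Spec_protected_ranges (tex : String) (out : List (Int × Int)) : Prop := out = protected_ranges_alt tex
instance (tex : String) (out : List (Int × Int)) : Decidable (Spec_protected_ranges tex out) := by unfold Spec_protected_ranges; infer_instance

-- ===== CLAIM (what is proved, stated in full; the proofs are below) =====
def Claim_equal_protected_ranges : Prop := ∀ (tex : String), Dom_protected_ranges tex → Spec_protected_ranges tex (protected_ranges tex)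

-- ===== LEMMAS AND PROOFS =====

-- canonical "index of the first '{'" used to relate tex.find('{', pos) with B's next_open table
def fo : List Char → Option Nat
  | [] => none
  | c :: r => if c = '{' then some 0 else (fo r).map (· + 1)

theorem fo_eq_none (l : List Char) (h : fo l = none) : '{' ∉ l := by
  induction l with
  | nil => simp
  | cons c r ih =>
    simp only [fo] at h
    split at h
    · simp at h
    · rename_i hc
      simp only [Option.map_eq_none_iff] at h
      intro hm
      rcases List.mem_cons.mp hm with h1 | h2
      · exact hc h1.symm
      · exact ih h h2

theorem fo_eq_some (l : List Char) (d : Nat) (h : fo l = some d) :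
    d < l.length ∧ l[d]? = some '{' ∧ ∀ i, i < d → l[i]? ≠ some '{' := by
  induction l generalizing d with
  | nil => simp [fo] at h
  | cons c r ih =>
    simp only [fo] at h
    split at h
    · rename_i hc
      obtain rfl : d = 0 := by simpa using h.symm
      simp [hc]
    · rename_i hc
      obtain ⟨d', hd', rfl⟩ := Option.map_eq_some_iff.mp h
      obtain ⟨h1, h2, h3⟩ := ih d' hd'
      refine ⟨by simp only [List.length_cons]; omega, by simpa using h2, ?_⟩
      intro i hi
      cases i with
      | zero => simpa using hc
      | succ i' => simpa using h3 i' (by omega)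

theorem singleton_prefix (l : List Char) : ['{'] <+: l ↔ l[0]? = some '{' := by
  cases l with
  | nil => simp
  | cons c r =>
    constructor
    · intro h
      have := h.getElem (i := 0) (by simp)
      simpa using this.symm
    · intro h
      have : c = '{' := by simpa using h
      exact ⟨r, by simp [this]⟩

theorem singleton_infix (l : List Char) : ['{'] <:+: l ↔ '{' ∈ l := by
  constructor
  · intro h; exact h.subset (by simp)
  · intro h
    obtain ⟨l₁, l₂, rfl⟩ := List.append_of_mem h
    exact ⟨l₁, l₂, by simp⟩

-- B's next_open table holds exactly the first-'{'-at-or-after index (n when there is none)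
theorem buildNO_getD (rest : List Char) (j n k : Nat) (hk : k ≤ rest.length) :
    (buildNO rest j n).getD k n =
      match fo (rest.drop k) with
      | some d => j + k + d
      | none => n := by
  induction rest generalizing j k with
  | nil =>
    obtain rfl : k = 0 := by simpa using hk
    simp [buildNO, fo]
  | cons c r ih =>
    cases k with
    | succ k' =>
      have hih := ih (j + 1) k' (by simp only [List.length_cons] at hk; omega)
      simp only [buildNO, List.getD_cons_succ, List.drop_succ_cons]
      rw [hih]
      cases h : fo (r.drop k') with
      | none => rfl
      | some d => show j + 1 + k' + d = j + (k' + 1) + d; omega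
    | zero =>
      by_cases hc : c = '{'
      · simp [buildNO, hc, fo]
      · have hhead : (buildNO r (j + 1) n).headD n = (buildNO r (j + 1) n).getD 0 n := by
          cases buildNO r (j + 1) n <;> simp
        simp only [buildNO, List.getD_cons_zero, List.drop_zero, fo, if_neg hc]
        rw [hhead, ih (j + 1) 0 (by simp)]
        simp only [List.drop_zero]
        cases h : fo r with
        | none => rfl
        | some d => show j + 1 + 0 + d = j + 0 + (d + 1); omega

-- tex.find('{', pos) through the same canonical function
theorem findFrom_fo (s : List Char) (pos : Nat) (hpos : pos ≤ s.length) :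
    PySem.Chars.findFrom s ['{'] (pos : Int) none =
      match fo (s.drop pos) with
      | some d => ((pos + d : Nat) : Int)
      | none => -1 := by
  cases h : fo (s.drop pos) with
  | none =>
    have : ¬ ['{'] <:+: s.drop pos := by
      rw [singleton_infix]; exact fo_eq_none _ h
    simpa using (PySem.Chars.findFrom_natCast_eq_neg_one_iff s ['{'] pos hpos).mpr this
  | some d =>
    obtain ⟨h1, h2, h3⟩ := fo_eq_some _ d h
    have hmem : '{' ∈ s.drop pos := List.mem_of_getElem? h2
    have hne : PySem.Chars.findFrom s ['{'] (pos : Int) none ≠ -1 := by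
      intro hcon
      exact ((PySem.Chars.findFrom_natCast_eq_neg_one_iff s ['{'] pos hpos).mp hcon)
        ((singleton_infix _).mpr hmem)
    obtain ⟨hge, hpre, hmin⟩ := PySem.Chars.findFrom_natCast_spec s ['{'] pos hpos hne
    set r := PySem.Chars.findFrom s ['{'] (pos : Int) none with hr
    have hr0 : (0 : Int) ≤ r := le_trans (by positivity) hge
    have hrpos : pos ≤ r.toNat := by omega
    have hrget : s[r.toNat]? = some '{' := by
      have := (singleton_prefix _).mp hpre
      simpa [List.getElem?_drop] using this
    have hdget : s[pos + d]? = some '{' := by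
      simpa [List.getElem?_drop] using h2
    have hle1 : r.toNat ≤ pos + d := by
      by_contra hlt
      exact hmin (pos + d) (by omega) (by omega)
        ((singleton_prefix _).mpr (by simpa [List.getElem?_drop] using hdget))
    have hle2 : pos + d ≤ r.toNat := by
      by_contra hlt
      exact h3 (r.toNat - pos) (by omega)
        (by rw [List.getElem?_drop]; simpa [Nat.add_sub_cancel' hrpos] using hrget)
    have : r = ((pos + d : Nat) : Int) := by omega
    simpa using this

-- one unrolling of find_brace_span's while-loop at position t (fuel is s.length - t)
theorem findSpanLoop_step (s : List Char) (t : Nat) (d : Int) (h : t < s.length) :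
    findSpanLoop s (s.length - t) t d =
      if s[t] = '{' then findSpanLoop s (s.length - (t + 1)) (t + 1) (d + 1)
      else if s[t] = '}' then
        (if d - 1 = 0 then some t else findSpanLoop s (s.length - (t + 1)) (t + 1) (d - 1))
      else findSpanLoop s (s.length - (t + 1)) (t + 1) d := by
  have hlen : s.length - t = (s.length - (t + 1)) + 1 := by omega
  rw [hlen]
  simp only [findSpanLoop]
  rw [dif_pos h]

-- invariant of B's stack pass: every fact it has recorded, and every stack entry, agrees with
-- the state of A's depth-counting scan started at that brace; hence the finished dict answers
-- exactly as find_brace_span's loop does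
theorem bm_inv (s : List Char) :
    ∀ (rest : List Char) (t : Nat) (st : List Nat) (m : PySem.Dict Nat Nat),
      s.drop t = rest → t ≤ s.length →
      (∀ (i : Nat) (h : i < st.length),
        findSpanLoop s (s.length - st[i]) st[i] 0 = findSpanLoop s (s.length - t) t ((i : Int) + 1)) →
      (∀ b e, m.get? b = some e → findSpanLoop s (s.length - b) b 0 = some e) →
      (∀ b, b < t → s[b]? = some '{' → b ∈ st ∨ (m.get? b).isSome) →
      ∀ b, b < s.length → s[b]? = some '{' →
        (buildMatch rest t st m).get? b = findSpanLoop s (s.length - b) b 0 := by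
  intro rest
  induction rest with
  | nil =>
    intro t st m hdrop ht hst hm hcomp b hb hbc
    have ht' : t = s.length := by
      have := congrArg List.length hdrop
      simp at this
      omega
    subst ht'
    show m.get? b = findSpanLoop s (s.length - b) b 0
    cases hg : m.get? b with
    | some e => rw [hm b e hg]
    | none =>
      have hbst : b ∈ st := by
        rcases hcomp b (by omega) hbc with h | h
        · exact h
        · rw [hg] at h; simp at h
      obtain ⟨i, hi, heq⟩ := List.mem_iff_getElem.mp hbst
      have h1 := hst i hi
      rw [heq] at h1
      have h2 : findSpanLoop s (s.length - s.length) s.length ((i : Int) + 1) = none := by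
        rw [Nat.sub_self]; rfl
      rw [h1, h2]
  | cons c rest' ih =>
    intro t st m hdrop ht hst hm hcomp
    have htlt : t < s.length := by
      have := congrArg List.length hdrop
      simp at this
      omega
    have hct : s[t]? = some c := by
      have h0 : (s.drop t)[0]? = s[t + 0]? := List.getElem?_drop ..
      rw [hdrop] at h0
      simpa using h0.symm
    have hgt : s[t] = c := by
      have := List.getElem?_eq_getElem htlt
      rw [hct] at this
      exact (Option.some_inj.mp this).symm
    have hdrop' : s.drop (t + 1) = rest' := by
      have h1 : s.drop (t + 1) = (s.drop t).drop 1 := by rw [List.drop_drop]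
      rw [h1, hdrop, List.drop_one, List.tail_cons]
    by_cases hc1 : c = '{'
    · subst hc1
      have hbm : buildMatch ('{' :: rest') t st m = buildMatch rest' (t + 1) (t :: st) m := by
        simp [buildMatch]
      rw [hbm]
      apply ih (t + 1) (t :: st) m hdrop' (by omega) ?_ hm ?_
      · intro i hi
        cases i with
        | zero =>
          simp only [List.getElem_cons_zero]
          rw [findSpanLoop_step s t 0 htlt, if_pos (by rw [hgt])]
          norm_num
        | succ i' =>
          simp only [List.getElem_cons_succ]
          have h1 := hst i' (by simpa using hi)
          rw [h1, findSpanLoop_step s t _ htlt, if_pos (by rw [hgt])]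
          push_cast
          ring_nf
      · intro b hb hbc
        by_cases hbt : b = t
        · exact Or.inl (by simp [hbt])
        · rcases hcomp b (by omega) hbc with h | h
          · exact Or.inl (List.mem_cons_of_mem _ h)
          · exact Or.inr h
    · by_cases hc2 : c = '}'
      · subst hc2
        cases st with
        | nil =>
          have hbm : buildMatch ('}' :: rest') t [] m = buildMatch rest' (t + 1) [] m := by
            simp [buildMatch]
          rw [hbm]
          apply ih (t + 1) [] m hdrop' (by omega) (by intro i hi; simp at hi) hm ?_
          intro b hb hbc
          by_cases hbt : b = t
          · rw [hbt, hct] at hbc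
            simp at hbc
          · exact hcomp b (by omega) hbc
        | cons b0 st' =>
          have hbm : buildMatch ('}' :: rest') t (b0 :: st') m
              = buildMatch rest' (t + 1) st' (m.insert b0 t) := by
            simp [buildMatch]
          rw [hbm]
          have hb0 : findSpanLoop s (s.length - b0) b0 0 = some t := by
            have h1 := hst 0 (by simp)
            simp only [List.getElem_cons_zero] at h1
            rw [h1, findSpanLoop_step s t _ htlt,
              if_neg (by rw [hgt]; decide), if_pos (by rw [hgt])]
            norm_num
          apply ih (t + 1) st' (m.insert b0 t) hdrop' (by omega) ?_ ?_ ?_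
          · intro i hi
            have h1 := hst (i + 1) (by simpa using hi)
            simp only [List.getElem_cons_succ] at h1
            rw [h1, findSpanLoop_step s t _ htlt,
              if_neg (by rw [hgt]; decide), if_pos (by rw [hgt]),
              if_neg (by push_cast; omega)]
            push_cast
            ring_nf
          · intro b e hbe
            rw [PySem.Dict.get?_insert] at hbe
            by_cases hbb : b = b0
            · rw [if_pos hbb] at hbe
              rw [hbb, hb0]
              exact hbe
            · rw [if_neg hbb] at hbe
              exact hm b e hbe
          · intro b hb hbc
            by_cases hbt : b = t
            · rw [hbt, hct] at hbc
              simp at hbc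
            · rcases hcomp b (by omega) hbc with h | h
              · rcases List.mem_cons.mp h with h' | h'
                · refine Or.inr ?_
                  rw [h', PySem.Dict.get?_insert, if_pos rfl]
                  rfl
                · exact Or.inl h'
              · refine Or.inr ?_
                rw [PySem.Dict.get?_insert]
                split
                · rfl
                · exact h
      · have hbm : buildMatch (c :: rest') t st m = buildMatch rest' (t + 1) st m := by
          simp [buildMatch, hc1, hc2]
        rw [hbm]
        apply ih (t + 1) st m hdrop' (by omega) ?_ hm ?_
        · intro i hi
          have h1 := hst i hi
          rw [h1, findSpanLoop_step s t _ htlt,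
            if_neg (by rw [hgt]; exact hc1), if_neg (by rw [hgt]; exact hc2)]
        · intro b hb hbc
          by_cases hbt : b = t
          · rw [hbt, hct] at hbc
            exact absurd (Option.some_inj.mp hbc) hc1
          · exact hcomp b (by omega) hbc

-- the finished dict of pass 1 answers exactly as A's find_brace_span loop on every '{'
theorem match_get (s : List Char) (b : Nat) (hb : b < s.length) (hc : s[b]? = some '{') :
    (buildMatch s 0 [] PySem.Dict.empty).get? b = findSpanLoop s (s.length - b) b 0 :=
  bm_inv s s 0 [] PySem.Dict.empty (by simp) (by omega)
    (by intro i hi; simp at hi) (by intro b e h; simp [PySem.Dict.get?_empty] at h)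
    (by intro b hb hbc; omega) b hb hc

theorem find_brace_span_open (s : List Char) (b : Nat) (hb : b < s.length)
    (hc : s[b]? = some '{') :
    find_brace_span s b = findSpanLoop s (s.length - b) b 0 := by
  have hgt : s[b] = '{' := by
    have := List.getElem?_eq_getElem hb
    rw [hc] at this
    exact (Option.some_inj.mp this).symm
  unfold find_brace_span
  rw [dif_pos hb, if_pos hgt]

-- a successful scan returns an index into s
theorem findSpanLoop_lt (s : List Char) :
    ∀ fuel i d e, findSpanLoop s fuel i d = some e → e < s.length := by
  intro fuel
  induction fuel with
  | zero => intro i d e h; simp [findSpanLoop] at h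
  | succ fuel ih =>
    intro i d e h
    simp only [findSpanLoop] at h
    split at h
    · split at h
      · exact ih _ _ _ h
      · split at h
        · split at h
          · injection h with h'
            omega
          · exact ih _ _ _ h
        · exact ih _ _ _ h
    · simp at h

theorem find_brace_span_lt (s : List Char) (st e : Nat)
    (h : find_brace_span s st = some e) : e < s.length := by
  unfold find_brace_span at h
  split at h
  · split at h
    · exact findSpanLoop_lt s _ _ _ _ h
    · simp at h
  · simp at h

-- one iteration of B's group-consuming loop computes exactly A's find('{') + find_brace_span step
theorem consume_succ (s : List Char) (pos g : Nat) (hpos : pos ≤ s.length) :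
    consumeB (buildMatch s 0 [] PySem.Dict.empty) (buildNO s 0 s.length) s.length pos (g + 1) =
      if PySem.Chars.findFrom s ['{'] (pos : Int) none = -1 then none
      else
        match find_brace_span s (PySem.Chars.findFrom s ['{'] (pos : Int) none).toNat with
        | none => none
        | some e =>
          consumeB (buildMatch s 0 [] PySem.Dict.empty) (buildNO s 0 s.length) s.length (e + 1) g := by
  have hff := findFrom_fo s pos hpos
  have hno := buildNO_getD s 0 s.length pos hpos
  cases h : fo (s.drop pos) with
  | none =>
    rw [h] at hff hno
    rw [if_pos hff]
    simp only [consumeB]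
    rw [hno]
    simp
  | some d =>
    rw [h] at hff hno
    have hff' : PySem.Chars.findFrom s ['{'] (pos : Int) none = ((pos + d : Nat) : Int) := hff
    have hno' : (buildNO s 0 s.length).getD pos s.length = pos + d := by
      rw [hno]
      show 0 + pos + d = pos + d
      omega
    obtain ⟨h1, h2, h3⟩ := fo_eq_some _ d h
    rw [List.length_drop] at h1
    have hlen : pos + d < s.length := by omega
    have hbc : s[pos + d]? = some '{' := by
      rw [← List.getElem?_drop]
      exact h2
    have hne : PySem.Chars.findFrom s ['{'] (pos : Int) none ≠ -1 := by
      rw [hff']; omega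
    rw [if_neg hne, hff']
    have htn : ((pos + d : Nat) : Int).toNat = pos + d := by omega
    rw [htn]
    simp only [consumeB]
    rw [hno', if_neg (by omega : ¬ pos + d = s.length),
      match_get s (pos + d) hlen hbc, ← find_brace_span_open s (pos + d) hlen hbc]

-- the three command prefixes are pairwise incompatible (they differ at index 1)
theorem prefix_incompat {l p q : List Char} (hp : p <+: l) (hq : q <+: l)
    (hkp : 1 < p.length) (hkq : 1 < q.length)
    (hne : p[1] ≠ q[1]) : False :=
  hne ((hp.getElem hkp).trans ((hq.getElem hkq)).symm)

theorem cast_succ_int (e : Nat) : ((e + 1 : Nat) : Int) = (e : Int) + 1 := by push_cast; ring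

-- the two main loops walk in lockstep: same position, same accumulator, same appended pair
theorem loop_eq (s : List Char) :
    ∀ fuel i acc, aLoop s fuel i acc =
      bLoop s (buildMatch s 0 [] PySem.Dict.empty) (buildNO s 0 s.length) fuel i acc := by
  intro fuel
  induction fuel with
  | zero => intro i acc; rfl
  | succ fuel ih =>
    intro i acc
    rw [aLoop, bLoop]
    by_cases hi : i < s.length
    · simp only [dif_pos hi]
      by_cases hP1 : PySem.Chars.startswith (s.drop i) "\\textbf{".toList = true
      · -- \textbf{ : one group on both sides
        have hfind : bTable.find? (fun pg => PySem.Chars.startswith (s.drop i) pg.1)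
            = some ("\\textbf{".toList, 1) := by
          simp only [bTable]
          exact List.find?_cons_of_pos hP1
        have hg' : 0 < ((bTable.find? (fun pg => PySem.Chars.startswith (s.drop i) pg.1)).map Prod.snd).getD 0 := by
          rw [hfind]; norm_num
        have hgv : ((bTable.find? (fun pg => PySem.Chars.startswith (s.drop i) pg.1)).map Prod.snd).getD 0 = 1 := by
          rw [hfind]; rfl
        rw [if_pos hP1, dif_pos hg', hgv]
        rw [consume_succ s i 0 (by omega)]
        by_cases hb : PySem.Chars.findFrom s ['{'] (i : Int) none ≠ -1
        · rw [dif_pos hb, if_neg (by exact hb)]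
          cases he : find_brace_span s (PySem.Chars.findFrom s ['{'] (i : Int) none).toNat with
          | some e =>
            simp only []
            show _ = bLoop _ _ _ _ (e + 1) (acc ++ [((i : Int), ((e + 1 : Nat) : Int))])
            rw [cast_succ_int]
            exact ih (e + 1) _
          | none => simp only []; exact ih (i + 1) acc
        · rw [dif_neg hb]
          push Not at hb
          rw [if_pos hb]
          exact ih (i + 1) acc
      · rw [if_neg hP1]
        by_cases hP2 : PySem.Chars.startswith (s.drop i) "\\url{".toList = true
        · -- \url{ : one group; \href{ cannot also match
          have hP3 : ¬ PySem.Chars.startswith (s.drop i) "\\href{".toList = true := by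
            intro hP3
            exact prefix_incompat ((PySem.Chars.startswith_iff _ _).mp hP2)
              ((PySem.Chars.startswith_iff _ _).mp hP3) (by decide) (by decide) (by decide)
          have hfind : bTable.find? (fun pg => PySem.Chars.startswith (s.drop i) pg.1)
              = some ("\\url{".toList, 1) := by
            simp only [bTable]
            rw [List.find?_cons_of_neg (by simpa using hP1)]
            exact List.find?_cons_of_pos hP2
          have hg' : 0 < ((bTable.find? (fun pg => PySem.Chars.startswith (s.drop i) pg.1)).map Prod.snd).getD 0 := by
            rw [hfind]; norm_num
          have hgv : ((bTable.find? (fun pg => PySem.Chars.startswith (s.drop i) pg.1)).map Prod.snd).getD 0 = 1 := by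
            rw [hfind]; rfl
          rw [if_pos (by rw [hP2]; rfl : (PySem.Chars.startswith (s.drop i) "\\url{".toList ||
            PySem.Chars.startswith (s.drop i) "\\href{".toList) = true), dif_pos hg', hgv]
          rw [consume_succ s i 0 (by omega)]
          by_cases hb : PySem.Chars.findFrom s ['{'] (i : Int) none ≠ -1
          · rw [dif_pos hb, if_neg (by exact hb)]
            cases he : find_brace_span s (PySem.Chars.findFrom s ['{'] (i : Int) none).toNat with
            | some e =>
              simp only []
              rw [if_neg hP3]
              show _ = bLoop _ _ _ _ (e + 1) (acc ++ [((i : Int), ((e + 1 : Nat) : Int))])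
              rw [cast_succ_int]
              exact ih (e + 1) _
            | none => simp only []; exact ih (i + 1) acc
          · rw [dif_neg hb]
            push Not at hb
            rw [if_pos hb]
            exact ih (i + 1) acc
        · by_cases hP3 : PySem.Chars.startswith (s.drop i) "\\href{".toList = true
          · -- \href{ : two groups
            have hfind : bTable.find? (fun pg => PySem.Chars.startswith (s.drop i) pg.1)
                = some ("\\href{".toList, 2) := by
              simp only [bTable]
              rw [List.find?_cons_of_neg (by simpa using hP1),
                List.find?_cons_of_neg (by simpa using hP2)]
              exact List.find?_cons_of_pos hP3
            have hg' : 0 < ((bTable.find? (fun pg => PySem.Chars.startswith (s.drop i) pg.1)).map Prod.snd).getD 0 := by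
              rw [hfind]; norm_num
            have hgv : ((bTable.find? (fun pg => PySem.Chars.startswith (s.drop i) pg.1)).map Prod.snd).getD 0 = 2 := by
              rw [hfind]; rfl
            rw [if_pos (by rw [hP3, Bool.or_true] : (PySem.Chars.startswith (s.drop i) "\\url{".toList ||
              PySem.Chars.startswith (s.drop i) "\\href{".toList) = true), dif_pos hg', hgv]
            rw [consume_succ s i 1 (by omega)]
            by_cases hb : PySem.Chars.findFrom s ['{'] (i : Int) none ≠ -1
            · rw [dif_pos hb, if_neg (by exact hb)]
              cases he : find_brace_span s (PySem.Chars.findFrom s ['{'] (i : Int) none).toNat with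
              | some e =>
                simp only []
                rw [if_pos hP3]
                have hel : e < s.length := find_brace_span_lt s _ e he
                rw [consume_succ s (e + 1) 0 (by omega)]
                by_cases hs2 : PySem.Chars.findFrom s ['{'] ((e + 1 : Nat) : Int) none ≠ -1
                · rw [dif_pos hs2, if_neg (by exact hs2)]
                  cases he2 : find_brace_span s (PySem.Chars.findFrom s ['{'] ((e + 1 : Nat) : Int) none).toNat with
                  | some e2 =>
                    simp only []
                    show _ = bLoop _ _ _ _ (e2 + 1) (acc ++ [((i : Int), ((e2 + 1 : Nat) : Int))])
                    rw [cast_succ_int]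
                    exact ih (e2 + 1) _
                  | none => simp only []; exact ih (i + 1) acc
                · rw [dif_neg hs2]
                  push Not at hs2
                  rw [if_pos hs2]
                  exact ih (i + 1) acc
              | none => simp only []; exact ih (i + 1) acc
            · rw [dif_neg hb]
              push Not at hb
              rw [if_pos hb]
              exact ih (i + 1) acc
          · -- no command matches: both advance by one
            have hfind : bTable.find? (fun pg => PySem.Chars.startswith (s.drop i) pg.1) = none := by
              simp only [bTable]
              rw [List.find?_cons_of_neg (by simpa using hP1),
                List.find?_cons_of_neg (by simpa using hP2),
                List.find?_cons_of_neg (by simpa using hP3)]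
              rfl
            rw [if_neg (by rw [Bool.or_eq_true]; tauto :
              ¬ (PySem.Chars.startswith (s.drop i) "\\url{".toList ||
                 PySem.Chars.startswith (s.drop i) "\\href{".toList) = true),
              dif_neg (by rw [hfind]; simp)]
            exact ih (i + 1) acc
    · simp only [dif_neg hi]

-- ===== VERDICT (by name: the statement is the Claim_ definition above) =====
theorem protected_ranges_spec : Claim_equal_protected_ranges := by
  intro tex _
  unfold Spec_protected_ranges protected_ranges protected_ranges_alt
  exact loop_eq tex.toList tex.toList.length 0 []
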